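-- pv_equiv track=rewrite | github.com/ThomasChuDesigns/CMPUT291_Project2 | core/util.py | parseAttributesInput
-- ===== SOURCE A (Python) =====
-- def parseAttributesInput(attr_input):
--     # given a string of attr_input convert to a list
--
--     # replace inner comma with ; as placeholder
--     # split string into list
--     attr_input = attr_input.replace(', ', ';')
--     attr_input = attr_input.split(',')
--     out = []
--
--     for attr in attr_input:
--         # remove {, }, ; keeping only attributes
--         attr = attr.replace('{', '')
--         attr = attr.replace('}', '')
--         attr = attr.replace(';', ',')
--         out.append(attr)
--
--     # returns a list of attributes from input string
--     return out
-- ===== SOURCE B (Python) =====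
-- def parseAttributesInput(attr_input):
--     # one left-to-right scan: drop braces, ';' -> ',', ', ' -> ',', split on bare ','
--     out = []
--     buf = []
--     i = 0
--     n = len(attr_input)
--     while i < n:
--         c = attr_input[i]
--         if c == '{' or c == '}':
--             i += 1
--         elif c == ';':
--             buf.append(',')
--             i += 1
--         elif c == ',':
--             if i + 1 < n and attr_input[i + 1] == ' ':
--                 buf.append(',')
--                 i += 2
--             else:
--                 out.append(''.join(buf))
--                 buf = []
--                 i += 1
--         else:
--             buf.append(c)
--             i += 1
--     out.append(''.join(buf))
--     return out
-- ===== Notes on version B (the rewrite author's own statement) =====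
-- stated objective: alternative
-- what changed: Replaced the replace(', ',';')/split(',')/per-piece replace pipeline by a single left-to-right character scan with a token buffer and a one-character lookahead after ','.
import Mathlib
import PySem

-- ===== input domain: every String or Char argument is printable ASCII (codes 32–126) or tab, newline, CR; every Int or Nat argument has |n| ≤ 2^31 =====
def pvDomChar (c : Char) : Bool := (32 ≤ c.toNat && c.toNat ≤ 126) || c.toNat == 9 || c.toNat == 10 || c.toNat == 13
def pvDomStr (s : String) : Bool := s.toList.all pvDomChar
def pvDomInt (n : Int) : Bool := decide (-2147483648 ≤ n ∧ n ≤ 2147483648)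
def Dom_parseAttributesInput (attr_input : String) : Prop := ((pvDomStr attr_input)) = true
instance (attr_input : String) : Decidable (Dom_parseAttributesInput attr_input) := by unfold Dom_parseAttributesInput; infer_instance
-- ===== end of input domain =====

-- B replaces A's replace/split/replace pipeline by one left-to-right character scan (alternative decomposition, same cost).


-- ===== PORT A =====
-- attr_input.replace(', ', ';'); .split(','); loop appending replace('{','').replace('}','').replace(';',',')
def parseAttributesInput (attr_input : String) : List String :=
  let s1 := PySem.Chars.replace attr_input.toList [',', ' '] [';']
  let pieces := PySem.Chars.splitOn s1 [',']
  pieces.foldl (fun out attr =>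
    let a1 := PySem.Chars.replace attr ['{'] []
    let a2 := PySem.Chars.replace a1 ['}'] []
    let a3 := PySem.Chars.replace a2 [';'] [',']
    out ++ [String.ofList a3]) []

-- ===== PORT B =====
-- Source B's while loop as structural recursion on the character list: buf is the current token,
-- the ',' branch looks one character ahead ('i += 2' = consuming two heads)
def scanGo : List Char → List Char → List (List Char)
  | buf, [] => [buf]
  | buf, c :: rest =>
    if c = '{' ∨ c = '}' then scanGo buf rest
    else if c = ';' then scanGo (buf ++ [',']) rest
    else if c = ',' then
      match rest with
      | ' ' :: rest2 => scanGo (buf ++ [',']) rest2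
      | r => buf :: scanGo [] r
    else scanGo (buf ++ [c]) rest
termination_by _ l => l.length
decreasing_by all_goals (simp only [List.length_cons]; omega)

def parseAttributesInput_alt (attr_input : String) : List String :=
  (scanGo [] attr_input.toList).map String.ofList

-- ===== PRECONDITION & SPEC =====
def Spec_parseAttributesInput (attr_input : String) (out : List String) : Prop := out = parseAttributesInput_alt attr_input
instance (attr_input : String) (out : List String) : Decidable (Spec_parseAttributesInput attr_input out) := by unfold Spec_parseAttributesInput; infer_instance

-- ===== CLAIM (what is proved, stated in full; the proofs are below) =====
def Claim_equal_parseAttributesInput : Prop := ∀ (attr_input : String), Dom_parseAttributesInput attr_input → Spec_parseAttributesInput attr_input (parseAttributesInput attr_input)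

-- ===== LEMMAS AND PROOFS =====

-- simple (fuel-free) characterisations of A's pipeline stages
def repl2 : List Char → List Char
  | [] => []
  | [c] => [c]
  | a :: b :: t => if a = ',' ∧ b = ' ' then ';' :: repl2 t else a :: repl2 (b :: t)

def splitsC : List Char → List (List Char)
  | [] => [[]]
  | a :: t => if a = ',' then [] :: splitsC t else (splitsC t).modifyHead (a :: ·)

def cleanC : List Char → List Char
  | [] => []
  | a :: t =>
    if a = '{' ∨ a = '}' then cleanC t
    else if a = ';' then ',' :: cleanC t
    else a :: cleanC t

lemma replace_single (c : Char) (new : List Char) :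
    ∀ (fuel : Nat) (l acc : List Char), l.length ≤ fuel →
      PySem.Chars.replace.go [c] new fuel l acc
        = acc.reverse ++ l.flatMap (fun x => if x = c then new else [x]) := by
  intro fuel
  induction fuel with
  | zero =>
    intro l acc h
    have : l = [] := List.length_eq_zero_iff.mp (Nat.le_zero.mp h)
    subst this; simp [PySem.Chars.replace.go]
  | succ n ih =>
    intro l acc h
    cases l with
    | nil => simp [PySem.Chars.replace.go]
    | cons a t =>
      by_cases hac : a = c
      · subst hac
        have hpre : List.isPrefixOf [a] (a :: t) = true := by simp [List.isPrefixOf]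
        simp only [PySem.Chars.replace.go, hpre, if_pos]
        have hd : List.drop [a].length (a :: t) = t := rfl
        rw [hd, ih t (new.reverse ++ acc) (by simpa using Nat.le_of_succ_le_succ h)]
        simp
      · have hpre : List.isPrefixOf [c] (a :: t) = false := by
          simp [List.isPrefixOf]
          exact fun h' => (hac h'.symm).elim
        simp only [PySem.Chars.replace.go, hpre, Bool.false_eq_true, if_false]
        rw [ih t (a :: acc) (by simpa using Nat.le_of_succ_le_succ h)]
        simp [hac]

lemma replace_commaSpace :
    ∀ (fuel : Nat) (l acc : List Char), l.length ≤ fuel →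
      PySem.Chars.replace.go [',', ' '] [';'] fuel l acc = acc.reverse ++ repl2 l := by
  intro fuel
  induction fuel with
  | zero =>
    intro l acc h
    have : l = [] := List.length_eq_zero_iff.mp (Nat.le_zero.mp h)
    subst this; simp [PySem.Chars.replace.go, repl2]
  | succ n ih =>
    intro l acc h
    match l with
    | [] => simp [PySem.Chars.replace.go, repl2]
    | [a] =>
      have hpre : List.isPrefixOf [',', ' '] [a] = false := by
        simp [List.isPrefixOf]
      simp only [PySem.Chars.replace.go, hpre, Bool.false_eq_true, if_false]
      rw [ih [] (a :: acc) (by simp)]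
      simp [repl2]
    | a :: b :: t =>
      by_cases hab : a = ',' ∧ b = ' '
      · obtain ⟨ha, hb⟩ := hab; subst ha; subst hb
        have hpre : List.isPrefixOf [',', ' '] (',' :: ' ' :: t) = true := by
          simp [List.isPrefixOf]
        simp only [PySem.Chars.replace.go, hpre, if_pos]
        have hd : List.drop [',', ' '].length (',' :: ' ' :: t) = t := rfl
        rw [hd, ih t (List.reverse [';'] ++ acc) (by simp at h ⊢; omega)]
        simp [repl2]
      · have hpre : List.isPrefixOf [',', ' '] (a :: b :: t) = false := by
          simp [List.isPrefixOf]
          intro h1 h2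
          exact hab ⟨h1.symm, h2.symm⟩
        simp only [PySem.Chars.replace.go, hpre, Bool.false_eq_true, if_false]
        rw [ih (b :: t) (a :: acc) (by simpa using Nat.le_of_succ_le_succ h)]
        rw [show repl2 (a :: b :: t) = a :: repl2 (b :: t) by rw [repl2, if_neg hab]]
        simp

lemma splitsC_ne_nil (l : List Char) : splitsC l ≠ [] := by
  induction l with
  | nil => simp [splitsC]
  | cons a t ih =>
    rw [splitsC]
    split_ifs
    · simp
    · cases h : splitsC t with
      | nil => exact absurd h ih
      | cons x r => simp [List.modifyHead]

lemma splitOn_go_comma :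
    ∀ (fuel : Nat) (l cur : List Char) (acc : List (List Char)), l.length ≤ fuel →
      PySem.Chars.splitOn.go [','] fuel l cur acc
        = acc.reverse ++ (splitsC l).modifyHead (cur.reverse ++ ·) := by
  intro fuel
  induction fuel with
  | zero =>
    intro l cur acc h
    have : l = [] := List.length_eq_zero_iff.mp (Nat.le_zero.mp h)
    subst this; simp [PySem.Chars.splitOn.go, splitsC, List.modifyHead]
  | succ n ih =>
    intro l cur acc h
    cases l with
    | nil => simp [PySem.Chars.splitOn.go, splitsC, List.modifyHead]
    | cons a t =>
      by_cases ha : a = ','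
      · subst ha
        have hpre : List.isPrefixOf [','] (',' :: t) = true := by simp [List.isPrefixOf]
        simp only [PySem.Chars.splitOn.go, hpre, if_pos]
        have hd : List.drop [','].length (',' :: t) = t := rfl
        rw [hd, ih t [] (cur.reverse :: acc) (by simpa using Nat.le_of_succ_le_succ h)]
        rw [show splitsC (',' :: t) = [] :: splitsC t by rw [splitsC, if_pos rfl]]
        cases hsp : splitsC t with
        | nil => exact absurd hsp (splitsC_ne_nil t)
        | cons x r => simp [List.modifyHead]
      · have hpre : List.isPrefixOf [','] (a :: t) = false := by
          simp [List.isPrefixOf]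
          exact fun h' => (ha h'.symm).elim
        simp only [PySem.Chars.splitOn.go, hpre, Bool.false_eq_true, if_false]
        rw [ih t (a :: cur) acc (by simpa using Nat.le_of_succ_le_succ h)]
        rw [show splitsC (a :: t) = (splitsC t).modifyHead (a :: ·) by rw [splitsC, if_neg ha]]
        cases hsp : splitsC t with
        | nil => exact absurd hsp (splitsC_ne_nil t)
        | cons x r => simp [List.modifyHead]

-- the three per-piece single-char replaces compose to cleanC
lemma clean_eq (p : List Char) :
    ((p.flatMap (fun x => if x = '{' then [] else [x])).flatMap
        (fun x => if x = '}' then [] else [x])).flatMap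
        (fun x => if x = ';' then [','] else [x]) = cleanC p := by
  induction p with
  | nil => simp [cleanC]
  | cons a t ih =>
    rw [cleanC]
    split_ifs with h1 h2
    · rcases h1 with h | h <;> subst h <;> simp_all
    · subst h2; simp_all
    · push Not at h1
      simp only [List.flatMap_cons, if_neg h1.1, List.singleton_append, List.flatMap_cons,
        if_neg h1.2, List.singleton_append, List.flatMap_cons, if_neg h2,
        List.singleton_append, ih]

-- main invariant: the scan equals clean-of-split-of-replace, with buf prefixed to the first token
lemma scan_eq (buf : List Char) (s : List Char) :
    scanGo buf s = ((splitsC (repl2 s)).map cleanC).modifyHead (buf ++ ·) := by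
  fun_induction scanGo buf s with
  | case1 buf => simp [repl2, splitsC, cleanC, List.modifyHead]
  | case2 buf c rest hbr ih =>
    -- c is '{' or '}': dropped on both sides
    have hc : c ≠ ',' := by rcases hbr with h | h <;> subst h <;> decide
    have hr : repl2 (c :: rest) = c :: repl2 rest := by
      cases rest with
      | nil => rfl
      | cons b t => rw [repl2, if_neg (by rintro ⟨h1, _⟩; exact hc h1)]
    rw [ih, hr, show splitsC (c :: repl2 rest) = (splitsC (repl2 rest)).modifyHead (c :: ·) by
      rw [splitsC, if_neg hc]]
    cases hsp : splitsC (repl2 rest) with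
    | nil => exact absurd hsp (splitsC_ne_nil _)
    | cons x r => simp [List.modifyHead, cleanC, hbr]
  | case3 buf rest _ ih =>
    have hr : repl2 (';' :: rest) = ';' :: repl2 rest := by
      cases rest with
      | nil => rfl
      | cons b t => rw [repl2, if_neg (by rintro ⟨h1, _⟩; exact absurd h1 (by decide))]
    rw [ih, hr, show splitsC (';' :: repl2 rest) = (splitsC (repl2 rest)).modifyHead (';' :: ·) by
      rw [splitsC, if_neg (by decide)]]
    cases hsp : splitsC (repl2 rest) with
    | nil => exact absurd hsp (splitsC_ne_nil _)
    | cons x r =>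
      simp only [List.modifyHead, List.map_cons]
      rw [show cleanC (';' :: x) = ',' :: cleanC x by
        rw [cleanC, if_neg (by decide), if_pos rfl]]
      simp
  | case4 buf rest2 _ _ ih =>
    -- ',' followed by ' ': both sides turn ", " into one ','
    have hr : repl2 (',' :: ' ' :: rest2) = ';' :: repl2 rest2 := by
      rw [repl2, if_pos ⟨rfl, rfl⟩]
    rw [ih, hr, show splitsC (';' :: repl2 rest2) = (splitsC (repl2 rest2)).modifyHead (';' :: ·) by
      rw [splitsC, if_neg (by decide)]]
    cases hsp : splitsC (repl2 rest2) with
    | nil => exact absurd hsp (splitsC_ne_nil _)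
    | cons x r =>
      simp only [List.modifyHead, List.map_cons]
      rw [show cleanC (';' :: x) = ',' :: cleanC x by
        rw [cleanC, if_neg (by decide), if_pos rfl]]
      simp
  | case5 buf r hns _ _ ih =>
    -- ',' not followed by ' ': token boundary on both sides
    have hr : repl2 (',' :: r) = ',' :: repl2 r := by
      cases r with
      | nil => rfl
      | cons b t =>
        rw [repl2, if_neg]
        rintro ⟨_, h2⟩
        subst h2
        exact hns t rfl
    rw [ih, hr, show splitsC (',' :: repl2 r) = [] :: splitsC (repl2 r) by
      rw [splitsC, if_pos rfl]]
    cases hsp : splitsC (repl2 r) with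
    | nil => exact absurd hsp (splitsC_ne_nil _)
    | cons x rr => simp [List.modifyHead, cleanC]
  | case6 buf c rest hbr hsemi hcomma ih =>
    -- ordinary character: appended to the buffer / kept in the piece
    have hr : repl2 (c :: rest) = c :: repl2 rest := by
      cases rest with
      | nil => rfl
      | cons b t => rw [repl2, if_neg (by rintro ⟨h1, _⟩; exact hcomma h1)]
    rw [ih, hr, show splitsC (c :: repl2 rest) = (splitsC (repl2 rest)).modifyHead (c :: ·) by
      rw [splitsC, if_neg hcomma]]
    cases hsp : splitsC (repl2 rest) with
    | nil => exact absurd hsp (splitsC_ne_nil _)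
    | cons x r =>
      simp only [List.modifyHead, List.map_cons]
      rw [show cleanC (c :: x) = c :: cleanC x by
        rw [cleanC, if_neg hbr, if_neg hsemi]]
      simp

-- ===== VERDICT (by name: the statement is the Claim_ definition above) =====
theorem parseAttributesInput_spec : Claim_equal_parseAttributesInput := by
  unfold Claim_equal_parseAttributesInput
  intro s _
  unfold Spec_parseAttributesInput parseAttributesInput parseAttributesInput_alt
  rw [PySem.List.foldl_append_singleton_eq_map]
  have hrepl : PySem.Chars.replace s.toList [',', ' '] [';'] = repl2 s.toList := by
    rw [PySem.Chars.replace, if_neg (by simp)]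
    exact replace_commaSpace s.toList.length s.toList [] (le_refl _)
  have hsplit : PySem.Chars.splitOn (repl2 s.toList) [','] = splitsC (repl2 s.toList) := by
    rw [PySem.Chars.splitOn, splitOn_go_comma _ _ [] [] (Nat.le_succ _)]
    cases h : splitsC (repl2 s.toList) with
    | nil => exact absurd h (splitsC_ne_nil _)
    | cons x r => simp [List.modifyHead]
  have h1 : ∀ (q : List Char) (c : Char) (new : List Char),
      PySem.Chars.replace q [c] new = q.flatMap (fun x => if x = c then new else [x]) := by
    intro q c new
    rw [PySem.Chars.replace, if_neg (by simp)]
    exact replace_single c new q.length q [] (le_refl _)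
  simp only [hrepl, hsplit, h1, clean_eq, scan_eq]
  cases h : splitsC (repl2 s.toList) with
  | nil => exact absurd h (splitsC_ne_nil _)
  | cons x r => simp [List.modifyHead]
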